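-- pv_equiv track=rewrite | github.com/wyattanderson/proxmox-backup-client-rpm | scripts/vendor-from-archive.py | compare_non_digit
-- ===== SOURCE A (Python) =====
-- def order_char(char: str) -> int:
--     if char == "~":
--         return -1
--     if char.isalnum():
--         return ord(char)
--     return ord(char) + 256
--
-- def compare_non_digit(left: str, right: str) -> int:
--     left_index = 0
--     right_index = 0
--     while left_index < len(left) or right_index < len(right):
--         left_char = left[left_index] if left_index < len(left) else ""
--         right_char = right[right_index] if right_index < len(right) else ""
--         left_order = order_char(left_char) if left_char else 0
--         right_order = order_char(right_char) if right_char else 0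
--         if left_order != right_order:
--             return -1 if left_order < right_order else 1
--         left_index += 1 if left_char else 0
--         right_index += 1 if right_char else 0
--     return 0
-- ===== SOURCE B (Python) =====
-- def order_char(char: str) -> int:
--     if char == "~":
--         return -1
--     if char.isalnum():
--         return ord(char)
--     return ord(char) + 256
--
-- def compare_non_digit(left: str, right: str) -> int:
--     n = max(len(left), len(right))
--     L = [order_char(c) for c in left] + [0] * (n - len(left))
--     R = [order_char(c) for c in right] + [0] * (n - len(right))
--     return (L > R) - (L < R)
-- ===== Notes on version B (the rewrite author's own statement) =====
-- stated objective: simpler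
-- what changed: Replaces the two-pointer conditional-advance while loop with building both full order-value lists padded with 0 and returning the sign of one lexicographic list comparison.
import Mathlib
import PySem

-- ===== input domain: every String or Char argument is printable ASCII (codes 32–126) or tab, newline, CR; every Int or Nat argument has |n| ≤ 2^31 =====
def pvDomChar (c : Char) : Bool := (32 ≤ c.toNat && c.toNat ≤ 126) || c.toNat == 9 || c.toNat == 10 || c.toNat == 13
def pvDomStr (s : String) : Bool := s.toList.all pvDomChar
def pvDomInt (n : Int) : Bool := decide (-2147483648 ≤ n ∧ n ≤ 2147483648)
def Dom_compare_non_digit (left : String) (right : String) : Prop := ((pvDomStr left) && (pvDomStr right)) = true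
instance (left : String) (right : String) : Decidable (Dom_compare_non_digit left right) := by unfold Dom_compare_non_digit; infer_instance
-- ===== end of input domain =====

-- B replaces A's two-pointer conditional-advance loop by building both padded
-- order-value lists and taking the sign of one lexicographic list comparison (objective: simpler).

-- shared module helper order_char (Python isalnum on ASCII = Char.isAlphanum)
def orderChar (c : Char) : Int :=
  if c = '~' then -1
  else if c.isAlphanum then (c.toNat : Int)
  else (c.toNat : Int) + 256

-- ===== PORT A =====
-- the while loop of A, case-split on whether each string is exhausted
def goA : List Char → List Char → Int
  | [], [] => 0
  | [], rc :: rrest =>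
      let lo : Int := 0
      let ro := orderChar rc
      if lo ≠ ro then (if lo < ro then -1 else 1) else goA [] rrest
  | lc :: lrest, [] =>
      let lo := orderChar lc
      let ro : Int := 0
      if lo ≠ ro then (if lo < ro then -1 else 1) else goA lrest []
  | lc :: lrest, rc :: rrest =>
      let lo := orderChar lc
      let ro := orderChar rc
      if lo ≠ ro then (if lo < ro then -1 else 1) else goA lrest rrest

def compare_non_digit (left : String) (right : String) : Int :=
  goA left.toList right.toList

-- ===== PORT B =====
-- Python list comparison: (L > R) - (L < R)
def listCmp : List Int → List Int → Int
  | [], [] => 0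
  | [], _ :: _ => -1
  | _ :: _, [] => 1
  | a :: l, b :: r => if a < b then -1 else if b < a then 1 else listCmp l r

def compare_non_digit_alt (left : String) (right : String) : Int :=
  let n := max left.toList.length right.toList.length
  let L := left.toList.map orderChar ++ List.replicate (n - left.toList.length) 0
  let R := right.toList.map orderChar ++ List.replicate (n - right.toList.length) 0
  listCmp L R

-- ===== PRECONDITION & SPEC =====
def Spec_compare_non_digit (left : String) (right : String) (out : Int) : Prop := out = compare_non_digit_alt left right
instance (left : String) (right : String) (out : Int) : Decidable (Spec_compare_non_digit left right out) := by unfold Spec_compare_non_digit; infer_instance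

-- ===== CLAIM (what is proved, stated in full; the proofs are below) =====
def Claim_equal_compare_non_digit : Prop := ∀ (left : String) (right : String), Dom_compare_non_digit left right → Spec_compare_non_digit left right (compare_non_digit left right)

-- ===== LEMMAS AND PROOFS =====

theorem orderChar_ne_zero (c : Char) : orderChar c ≠ 0 := by
  unfold orderChar
  split_ifs with h1 h2
  · decide
  · have : c.isAlphanum = true := h2
    simp [Char.isAlphanum, Char.isAlpha, Char.isDigit, Char.isLower, Char.isUpper,
      UInt32.le_iff_toNat_le] at this
    have hv : c.toNat = c.val.toNat := rfl
    intro h; omega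
  · intro h
    have : (c.toNat : Int) = -256 := by omega
    omega

theorem goA_eq_listCmp (l r : List Char) :
    goA l r = listCmp (l.map orderChar ++ List.replicate (max l.length r.length - l.length) 0)
                      (r.map orderChar ++ List.replicate (max l.length r.length - r.length) 0) := by
  induction l generalizing r with
  | nil =>
    induction r with
    | nil => simp [goA, listCmp]
    | cons rc rrest ih =>
      have h := orderChar_ne_zero rc
      simp only [goA, List.map, List.length_nil, List.length_cons,
        List.nil_append, Nat.zero_max, Nat.sub_self]
      rw [Nat.sub_zero, List.replicate_succ]
      by_cases hlt : (0 : Int) < orderChar rc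
      · simp [listCmp, hlt, h.symm]
      · have hgt : orderChar rc < 0 := lt_of_le_of_ne (not_lt.mp hlt) h
        simp [listCmp, hlt, hgt, h.symm]
  | cons lc lrest ih =>
    cases r with
    | nil =>
      have h := orderChar_ne_zero lc
      simp only [goA, List.map, List.length_cons, List.length_nil,
        List.nil_append]
      rw [show max (lrest.length + 1) 0 - (lrest.length + 1) = 0 by omega,
        show max (lrest.length + 1) 0 - 0 = lrest.length + 1 by omega,
        List.replicate_succ]
      by_cases hlt : orderChar lc < 0
      · simp [listCmp, hlt, h]
      · have hgt : (0 : Int) < orderChar lc := lt_of_le_of_ne (not_lt.mp hlt) (Ne.symm h)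
        simp [listCmp, hlt, hgt, h]
    | cons rc rrest =>
      simp only [goA, List.map, List.length_cons, List.cons_append, listCmp]
      rw [show max (lrest.length + 1) (rrest.length + 1) - (lrest.length + 1)
            = max lrest.length rrest.length - lrest.length by omega,
          show max (lrest.length + 1) (rrest.length + 1) - (rrest.length + 1)
            = max lrest.length rrest.length - rrest.length by omega]
      by_cases hne : orderChar lc ≠ orderChar rc
      · by_cases hlt : orderChar lc < orderChar rc
        · simp [hne, hlt]
        · have hgt : orderChar rc < orderChar lc := by
            rcases lt_trichotomy (orderChar lc) (orderChar rc) with h'|h'|h' <;> simp_all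
          simp [hne, hlt, hgt]
      · have hne : orderChar lc = orderChar rc := not_not.mp hne
        rw [if_neg (by simp [hne]), if_neg (by rw [hne]; exact lt_irrefl _),
          if_neg (by rw [hne]; exact lt_irrefl _)]
        exact ih rrest

-- ===== VERDICT (by name: the statement is the Claim_ definition above) =====
theorem compare_non_digit_spec : Claim_equal_compare_non_digit := by
  intro left right _
  unfold Spec_compare_non_digit compare_non_digit compare_non_digit_alt
  exact goA_eq_listCmp left.toList right.toList
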